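-- pv_equiv track=rewrite | github.com/narjoDev/advent-of-code-2025 | 06/solution.py | separate_problems
-- ===== SOURCE A (Python) =====
-- from typing import List, TypeVar
--
-- def separate_problems(grid: List[List[str]]) -> List[List[List[str]]]:
--     def is_row_empty(row: List[str]) -> bool:
--         for char in row:
--             if char != " ":
--                 return False
--         return True
--
--     # split on empty rows
--     problems = []
--
--     next_start_row = 0
--     for row_index in range(1, len(grid)):
--         if is_row_empty(grid[row_index]):
--             problems.append(grid[next_start_row:row_index])
--             next_start_row = row_index + 1
--     if next_start_row < len(grid):
--         problems.append(grid[next_start_row:])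
--
--     return problems
-- ===== SOURCE B (Python) =====
-- def separate_problems(grid):
--     # One pass with an accumulator buffer instead of start-index bookkeeping + slicing.
--     if not grid:
--         return []
--     problems = []
--     current = [grid[0]]  # the first row always belongs to the first group
--     for row in grid[1:]:
--         if all(c == " " for c in row):
--             problems.append(current)
--             current = []
--         else:
--             current.append(row)
--     if current:
--         problems.append(current)
--     return problems
-- ===== Notes on version B (the rewrite author's own statement) =====
-- stated objective: simpler
-- what changed: Replaces the start-index-and-slice bookkeeping (recording next_start_row and re-slicing the grid at each blank row) with a single accumulator buffer that collects rows of the current group and is flushed on each blank row.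
import Mathlib
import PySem

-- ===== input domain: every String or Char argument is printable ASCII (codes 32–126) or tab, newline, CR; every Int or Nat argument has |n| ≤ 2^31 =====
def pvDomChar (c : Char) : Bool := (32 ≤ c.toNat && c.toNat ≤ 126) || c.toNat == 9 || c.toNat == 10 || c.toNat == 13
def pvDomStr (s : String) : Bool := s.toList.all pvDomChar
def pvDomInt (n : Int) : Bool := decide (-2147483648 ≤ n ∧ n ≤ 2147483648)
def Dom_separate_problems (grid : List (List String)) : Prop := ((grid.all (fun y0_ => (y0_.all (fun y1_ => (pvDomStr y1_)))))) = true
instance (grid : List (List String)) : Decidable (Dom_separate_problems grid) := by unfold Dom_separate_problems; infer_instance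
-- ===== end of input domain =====

-- B replaces A's start-index-and-slice bookkeeping by a one-pass accumulator buffer (objective: simpler).

-- ===== PORT A =====
-- inner helper is_row_empty: for-loop with early return
def isRowEmptyA : List String → Bool
  | [] => true
  | c :: rest => if c != " " then false else isRowEmptyA rest

-- loop body of 'for row_index in range(1, len(grid))', state = (problems, next_start_row)
def stepA (grid : List (List String)) (st : List (List (List String)) × Int) (i : Int) :
    List (List (List String)) × Int :=
  if isRowEmptyA (PySem.List.pyGetD grid i []) then
    (st.1 ++ [PySem.List.slice grid (some st.2) (some i)], i + 1)
  else st

def separate_problems (grid : List (List String)) : List (List (List String)) :=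
  let st := (PySem.List.pyRange 1 (grid.length : Int) 1).foldl (stepA grid) ([], 0)
  if st.2 < (grid.length : Int) then st.1 ++ [PySem.List.slice grid (some st.2) none] else st.1

-- ===== PORT B =====
-- all(c == " " for c in row)
def isBlankB (row : List String) : Bool := row.all (fun c => c == " ")

-- loop body of 'for row in grid[1:]', state = (problems, current)
def stepB (st : List (List (List String)) × List (List String)) (row : List String) :
    List (List (List String)) × List (List String) :=
  if isBlankB row then (st.1 ++ [st.2], []) else (st.1, st.2 ++ [row])

def separate_problems_alt (grid : List (List String)) : List (List (List String)) :=
  match grid with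
  | [] => []
  | g0 :: rest =>
    let st := rest.foldl stepB ([], [g0])
    if st.2.isEmpty then st.1 else st.1 ++ [st.2]

-- ===== PRECONDITION & SPEC =====
def Spec_separate_problems (grid : List (List String)) (out : List (List (List String))) : Prop := out = separate_problems_alt grid
instance (grid : List (List String)) (out : List (List (List String))) : Decidable (Spec_separate_problems grid out) := by unfold Spec_separate_problems; infer_instance

-- ===== CLAIM (what is proved, stated in full; the proofs are below) =====
def Claim_equal_separate_problems : Prop := ∀ (grid : List (List String)), Dom_separate_problems grid → Spec_separate_problems grid (separate_problems grid)

-- ===== LEMMAS AND PROOFS =====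

-- the two row-emptiness tests agree
theorem isRowEmptyA_eq (row : List String) : isRowEmptyA row = isBlankB row := by
  induction row with
  | nil => rfl
  | cons c rest ih =>
    simp only [isRowEmptyA, isBlankB, List.all_cons]
    by_cases h : c = " " <;> simp [h, ih, isBlankB]

-- finishing steps of A and B
def finishA (grid : List (List String)) (st : List (List (List String)) × Int) :
    List (List (List String)) :=
  if st.2 < (grid.length : Int) then st.1 ++ [PySem.List.slice grid (some st.2) none] else st.1

def finishB (st : List (List (List String)) × List (List String)) :
    List (List (List String)) :=
  if st.2.isEmpty then st.1 else st.1 ++ [st.2]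

-- main loop invariant: A's (problems, next_start) corresponds to B's (problems, current)
-- with current = grid[next_start:k] when both loops still have indices/rows from k on to process
theorem loop_corr (grid : List (List String)) :
    ∀ (j k s : Nat) (P : List (List (List String))),
      grid.length - k = j → s ≤ k → k ≤ grid.length →
      finishA grid (((PySem.List.pyRange (k : Int) (grid.length : Int) 1)).foldl (stepA grid) (P, (s : Int)))
        = finishB ((grid.drop k).foldl stepB (P, (grid.drop s).take (k - s))) := by
  intro j
  induction j with
  | zero =>
    intro k s P hj hsk hk
    have hkn : k = grid.length := by omega
    subst hkn
    rw [PySem.List.pyRange_one_eq_nil (by omega)]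
    simp only [List.foldl_nil, List.drop_length]
    have hcur : (grid.drop s).take (grid.length - s) = grid.drop s := by
      apply List.take_of_length_le; simp
    rw [hcur]
    simp only [finishA, finishB]
    by_cases hs : s < grid.length
    · rw [if_pos (by exact_mod_cast hs), PySem.List.slice_from_natCast]
      rw [if_neg (by simp [List.isEmpty_iff, List.drop_eq_nil_iff]; omega)]
    · have hse : s = grid.length := by omega
      subst hse
      rw [if_neg (by omega), List.drop_length]
      simp
  | succ j ih =>
    intro k s P hj hsk hk
    have hkn : k < grid.length := by omega
    rw [PySem.List.pyRange_one_cons (by exact_mod_cast hkn)]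
    rw [List.drop_eq_getElem_cons hkn]
    simp only [List.foldl_cons]
    have hget : PySem.List.pyGetD grid (k : Int) ([] : List String) = grid[k] :=
      PySem.List.pyGetD_ofNat grid k [] hkn
    by_cases hb : isBlankB grid[k]
    · -- blank row: A appends the slice, B flushes the buffer
      have hA : stepA grid (P, (s : Int)) (k : Int)
          = (P ++ [(grid.drop s).take (k - s)], (k : Int) + 1) := by
        simp only [stepA, hget, isRowEmptyA_eq, hb, if_pos]
        rw [PySem.List.slice_natCast]
      have hB : stepB (P, (grid.drop s).take (k - s)) grid[k]
          = (P ++ [(grid.drop s).take (k - s)], []) := by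
        simp [stepB, hb]
      rw [hA, hB]
      have : ((k : Int) + 1) = ((k + 1 : Nat) : Int) := by push_cast; ring
      rw [this]
      have := ih (k + 1) (k + 1) (P ++ [(grid.drop s).take (k - s)]) (by omega) (by omega) (by omega)
      simpa using this
    · -- non-blank row: A keeps its state, B extends the buffer
      have hA : stepA grid (P, (s : Int)) (k : Int) = (P, (s : Int)) := by
        simp [stepA, hget, isRowEmptyA_eq, hb]
      have hB : stepB (P, (grid.drop s).take (k - s)) grid[k]
          = (P, (grid.drop s).take (k + 1 - s)) := by
        simp only [stepB, hb, if_neg, Bool.false_eq_true, not_false_iff]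
        congr 1
        have h1 : k + 1 - s = (k - s) + 1 := by omega
        rw [h1, List.take_add_one]
        have h2 : (grid.drop s)[k - s]? = some grid[k] := by
          rw [List.getElem?_drop, show s + (k - s) = k from by omega,
            List.getElem?_eq_getElem hkn]
        simp [h2]
      rw [hA, hB]
      exact ih (k + 1) s P (by omega) (by omega) (by omega)

-- ===== VERDICT (by name: the statement is the Claim_ definition above) =====
theorem separate_problems_spec : Claim_equal_separate_problems := by
  intro grid _
  show separate_problems grid = separate_problems_alt grid
  cases grid with
  | nil => rfl
  | cons g0 rest =>
    have h := loop_corr (g0 :: rest) ((g0 :: rest).length - 1) 1 0 [] rfl (by omega) (by simp)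
    simpa [separate_problems, separate_problems_alt, finishA, finishB] using h
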